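-- pv_equiv track=rewrite | github.com/pytorch/PiPPy | pippy/LoadModule.py | _match_checkpoint_name
-- ===== SOURCE A (Python) =====
-- from typing import Dict, List, Optional, Tuple, Union
--
-- TYPICAL_SHARER_WEIGHTS = [
--     "lm_head.weight",  # facebook/opt-6.7b
--     "encoder_embed_tokens.weight",
-- ]
--
-- TYPICAL_SHAREE_WEIGHTS = [
--     "decoder.embed_tokens.weight",
--     "word_embeddings.weight",
--     "shared.weight",
--     "wte.weight",
-- ]
--
-- def _match_checkpoint_name(
--     old_name: str,
--     index,
--     prefix_to_test: List[str],
-- ) -> Tuple[Optional[str], bool]: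
--     """
--     A helper function to match weight name against those in checkpoint index.
--     Args:
--         old_name (`str`):
--             weight name in original model (retrieved via `remap_qualname()`)
--         index (`Dict`?):
--             checkpoint index
--         prefix_to_test (`List[str]`):
--             prefix to try if direct match is not found
--     Return:
--         weight name in the checkpoint index and whether clone is needed
--     Search rule:
--         - Exact match, no need to clone
--         - Match after prefix, no need to clone
--         - Match via shared weight table, clone needed
--     """
--     if old_name in index.keys():
--         return old_name, False
--
--     for prefix in prefix_to_test:
--         if (
--             old_name.startswith(prefix)
--             and old_name[len(prefix) + 1 :] in index.keys()
--         ):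
--             return old_name[len(prefix) + 1 :], False
--
--     if old_name in TYPICAL_SHARER_WEIGHTS:
--         for sharee in TYPICAL_SHAREE_WEIGHTS:
--             if sharee in index.keys():
--                 return sharee, True
--
--     return None, False
-- ===== SOURCE B (Python) =====
-- TYPICAL_SHARER_WEIGHTS = [
--     "lm_head.weight",  # facebook/opt-6.7b
--     "encoder_embed_tokens.weight",
-- ]
--
-- TYPICAL_SHAREE_WEIGHTS = [
--     "decoder.embed_tokens.weight",
--     "word_embeddings.weight",
--     "shared.weight",
--     "wte.weight",
-- ]
--
-- def _match_checkpoint_name(old_name, index, prefix_to_test):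
--     # Inverted search: build a candidate-name -> priority-rank table once
--     # (0 = exact, 1..P = prefix-stripped, >P = shared weights; setdefault keeps
--     # the best = first-inserted rank), then a single pass over the checkpoint
--     # keys returns the minimum-rank key.
--     P = len(prefix_to_test)
--     rank = {old_name: 0}
--     for i, prefix in enumerate(prefix_to_test):
--         if old_name.startswith(prefix):
--             rank.setdefault(old_name[len(prefix) + 1:], 1 + i)
--     if old_name in TYPICAL_SHARER_WEIGHTS:
--         for j, sharee in enumerate(TYPICAL_SHAREE_WEIGHTS):
--             rank.setdefault(sharee, 1 + P + j)
--     best = None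
--     for key in index.keys():
--         r = rank.get(key)
--         if r is not None and (best is None or r < best[0]):
--             best = (r, key)
--     if best is None:
--         return None, False
--     return best[1], best[0] > P
-- ===== Notes on version B (the rewrite author's own statement) =====
-- stated objective: alternative
-- what changed: B inverts the search direction: it builds a candidate-name -> priority-rank table once (exact name rank 0, prefix-stripped names ranks 1..P, shared-weight names ranks >P, setdefault keeping the first rank), then a single pass over the checkpoint keys keeps the minimum-rank key, instead of A's probing of candidate names against the index one by one; strictly increasing ranks along the priority order make the minimum-rank key equal A's first match.
import Mathlib
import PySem

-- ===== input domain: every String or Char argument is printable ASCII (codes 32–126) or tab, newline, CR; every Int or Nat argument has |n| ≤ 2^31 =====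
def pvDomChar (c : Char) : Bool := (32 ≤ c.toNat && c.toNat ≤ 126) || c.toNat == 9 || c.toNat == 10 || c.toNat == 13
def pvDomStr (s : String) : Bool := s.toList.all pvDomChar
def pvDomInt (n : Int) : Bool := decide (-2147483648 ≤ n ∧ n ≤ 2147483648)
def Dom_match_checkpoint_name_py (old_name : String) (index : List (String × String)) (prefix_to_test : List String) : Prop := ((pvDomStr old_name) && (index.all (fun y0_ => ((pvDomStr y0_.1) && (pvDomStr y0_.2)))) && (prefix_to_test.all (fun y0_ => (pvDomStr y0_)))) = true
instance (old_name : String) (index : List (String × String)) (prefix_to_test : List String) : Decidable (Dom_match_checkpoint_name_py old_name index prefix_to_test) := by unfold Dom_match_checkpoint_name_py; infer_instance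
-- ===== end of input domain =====

-- B inverts the search: instead of probing candidate names against the index, it builds
-- a candidate-name -> priority-rank table once and keeps the best-ranked checkpoint key ("alternative").

-- shared constants (module-level lists in the Python source)
def pvSharer : List String := ["lm_head.weight", "encoder_embed_tokens.weight"]
def pvSharee : List String :=
  ["decoder.embed_tokens.weight", "word_embeddings.weight", "shared.weight", "wte.weight"]

-- name in index.keys()
def pvInKeys (n : String) (index : List (String × String)) : Bool :=
  index.any (fun kv => kv.1 == n)

-- old_name[len(prefix) + 1:]
def pvCut (old_name p : String) : String :=
  PySem.Str.slice old_name (some (PySem.Str.len p + 1)) none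

-- ===== PORT A =====
def pvPrefixLoop (old_name : String) (index : List (String × String)) :
    List String → Option (Option String × Bool)
  | [] => none
  | p :: ps =>
    if PySem.Str.startswith old_name p && pvInKeys (pvCut old_name p) index then
      some (some (pvCut old_name p), false)
    else pvPrefixLoop old_name index ps

def pvShareeLoop (index : List (String × String)) : List String → Option String × Bool
  | [] => (none, false)
  | s :: ss => if pvInKeys s index then (some s, true) else pvShareeLoop index ss

def match_checkpoint_name_py (old_name : String) (index : List (String × String)) (prefix_to_test : List String) : Option String × Bool :=
  if pvInKeys old_name index then (some old_name, false)
  else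
    match pvPrefixLoop old_name index prefix_to_test with
    | some r => r
    | none =>
      if pvSharer.contains old_name then pvShareeLoop index pvSharee
      else (none, false)

-- ===== PORT B =====
-- the `for i, prefix in enumerate(prefix_to_test)` loop of setdefaults
def pvTblPfx (old_name : String) (i : Int) (d : PySem.Dict String Int) :
    List String → PySem.Dict String Int
  | [] => d
  | p :: ps =>
      pvTblPfx old_name (i + 1)
        (if PySem.Str.startswith old_name p then
          d.setdefault (pvCut old_name p) (1 + i)
        else d) ps

-- the `for j, sharee in enumerate(TYPICAL_SHAREE_WEIGHTS)` loop of setdefaults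
def pvTblShr (P j : Int) (d : PySem.Dict String Int) : List String → PySem.Dict String Int
  | [] => d
  | s :: ss => pvTblShr P (j + 1) (d.setdefault s (1 + P + j)) ss

-- the finished rank table: {old_name: 0}, then the two setdefault loops
def pvRankTbl (old_name : String) (prefix_to_test : List String) : PySem.Dict String Int :=
  let d1 := pvTblPfx old_name 0 (PySem.Dict.mk [(old_name, 0)]) prefix_to_test
  if pvSharer.contains old_name then
    pvTblShr (prefix_to_test.length : Int) 0 d1 pvSharee
  else d1

-- the `for key in index.keys()` loop maintaining `best` (rank.get(key) = tbl.get?)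
def pvBestLoop (tbl : PySem.Dict String Int) :
    List (String × String) → Option (Int × String) → Option (Int × String)
  | [], best => best
  | kv :: rest, best =>
      pvBestLoop tbl rest
        (match tbl.get? kv.1, best with
         | some r, none => some (r, kv.1)
         | some r, some b => if r < b.1 then some (r, kv.1) else some b
         | none, b => b)

def match_checkpoint_name_py_alt (old_name : String) (index : List (String × String)) (prefix_to_test : List String) : Option String × Bool :=
  match pvBestLoop (pvRankTbl old_name prefix_to_test) index none with
  | none => (none, false)
  | some b => (some b.2, decide ((prefix_to_test.length : Int) < b.1))

-- ===== PRECONDITION & SPEC =====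
def Spec_match_checkpoint_name_py (old_name : String) (index : List (String × String)) (prefix_to_test : List String) (out : Option String × Bool) : Prop := out = match_checkpoint_name_py_alt old_name index prefix_to_test
instance (old_name : String) (index : List (String × String)) (prefix_to_test : List String) (out : Option String × Bool) : Decidable (Spec_match_checkpoint_name_py old_name index prefix_to_test out) := by unfold Spec_match_checkpoint_name_py; infer_instance

-- ===== CLAIM (what is proved, stated in full; the proofs are below) =====
def Claim_equal_match_checkpoint_name_py : Prop := ∀ (old_name : String) (index : List (String × String)) (prefix_to_test : List String), Dom_match_checkpoint_name_py old_name index prefix_to_test → Spec_match_checkpoint_name_py old_name index prefix_to_test (match_checkpoint_name_py old_name index prefix_to_test)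

-- ===== LEMMAS AND PROOFS =====

-- The proof relates both programs to one mathematical object: the ordered list of
-- (rank, candidate-name) pairs.  A is "first candidate whose name is a key";
-- B's rank table maps each name to its first (least) rank, and B's loop takes the
-- minimum rank over the keys; strictly increasing ranks make the two coincide.

-- prefix candidates with their ranks (counter i)
def cpfx (old_name : String) (i : Int) : List String → List (Int × String)
  | [] => []
  | p :: ps =>
      (if PySem.Str.startswith old_name p then [(1 + i, pvCut old_name p)] else [])
        ++ cpfx old_name (i + 1) ps

-- sharee candidates with their ranks (offset j past 1 + P)
def cshr (P j : Int) : List String → List (Int × String)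
  | [] => []
  | s :: ss => (1 + P + j, s) :: cshr P (j + 1) ss

def cands (old_name : String) (pts : List String) : List (Int × String) :=
  (0, old_name) ::
    (cpfx old_name 0 pts ++
      (if pvSharer.contains old_name then cshr (pts.length : Int) 0 pvSharee else []))

theorem inKeys_iff (n : String) (index : List (String × String)) :
    pvInKeys n index = true ↔ ∃ kv ∈ index, kv.1 = n := by
  simp [pvInKeys, List.any_eq_true, beq_iff_eq]

-- ---- rank = first matching-name rank in cands ----

theorem get?_setdefault (d : PySem.Dict String Int) (k : String) (v : Int) (x : String) :
    (d.setdefault k v).get? x = (d.get? x).or (if k == x then some v else none) := by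
  unfold PySem.Dict.setdefault
  cases hc : d.contains k with
  | true =>
    simp only [if_true]
    cases hk : (k == x) with
    | false => simp
    | true =>
      have hkx : k = x := beq_iff_eq.1 hk
      subst hkx
      have : (d.get? k).isSome = true := by
        rw [← PySem.Dict.contains_eq_isSome_get?]; exact hc
      obtain ⟨w, hw⟩ := Option.isSome_iff_exists.1 this
      simp [hw]
  | false =>
    simp only [Bool.false_eq_true, if_false]
    unfold PySem.Dict.get?
    rw [List.find?_append]
    cases hf : d.items.find? (fun p => p.1 == x) with
    | some e => simp
    | none =>
      simp only [Option.none_or, Option.map_none]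
      cases hk : (k == x) with
      | false => simp [hk]
      | true => simp [beq_iff_eq.1 hk]

theorem tblPfx_get? (old_name x : String) (ps : List String) :
    ∀ (i : Int) (d : PySem.Dict String Int),
      (pvTblPfx old_name i d ps).get? x
        = (d.get? x).or (((cpfx old_name i ps).find? (fun c => c.2 == x)).map (·.1)) := by
  induction ps with
  | nil => intro i d; simp [pvTblPfx, cpfx]
  | cons p ps ih =>
    intro i d
    cases hs : PySem.Str.startswith old_name p with
    | false =>
      simp only [pvTblPfx, hs, Bool.false_eq_true, if_false, cpfx, List.nil_append]
      exact ih (i + 1) d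
    | true =>
      simp only [pvTblPfx, hs, if_true, cpfx, List.singleton_append, List.find?_cons]
      rw [ih (i + 1) _, get?_setdefault, Option.or_assoc]
      cases hk : (pvCut old_name p == x) with
      | false => simp
      | true => simp

theorem tblShr_get? (x : String) (ss : List String) (P : Int) :
    ∀ (j : Int) (d : PySem.Dict String Int),
      (pvTblShr P j d ss).get? x
        = (d.get? x).or (((cshr P j ss).find? (fun c => c.2 == x)).map (·.1)) := by
  induction ss with
  | nil => intro j d; simp [pvTblShr, cshr]
  | cons s ss ih =>
    intro j d
    simp only [pvTblShr, cshr, List.find?_cons]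
    rw [ih (j + 1) _, get?_setdefault, Option.or_assoc]
    cases hk : (s == x) with
    | false => simp
    | true => simp

theorem rankTbl_get? (old_name : String) (pts : List String) (key : String) :
    (pvRankTbl old_name pts).get? key
      = ((cands old_name pts).find? (fun c => c.2 == key)).map (·.1) := by
  unfold pvRankTbl cands
  have h0 : (PySem.Dict.mk [(old_name, (0 : Int))]).get? key
      = if old_name == key then some 0 else none := by
    rw [PySem.Dict.get?_mk_cons]
    cases h : (old_name == key) with
    | true => simp
    | false => simp [PySem.Dict.get?]
  rw [List.find?_cons]
  cases hsh : pvSharer.contains old_name with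
  | false =>
    simp only [Bool.false_eq_true, if_false]
    rw [tblPfx_get?, h0, List.find?_append]
    cases h : (old_name == key) with
    | true => simp
    | false =>
      simp only [Bool.false_eq_true, if_false, Option.none_or, List.find?_nil,
        Option.or_none]
  | true =>
    simp only [if_true]
    rw [tblShr_get?, tblPfx_get?, h0, List.find?_append, Option.or_assoc]
    cases h : (old_name == key) with
    | true => simp
    | false =>
      simp only [Bool.false_eq_true, if_false, Option.none_or]
      cases (cpfx old_name 0 pts).find? (fun c => c.2 == key) with
      | none => simp
      | some c => simp

theorem cpfx_bounds (old_name : String) (ps : List String) (i : Int) :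
    ∀ c ∈ cpfx old_name i ps, i < c.1 ∧ c.1 ≤ i + ps.length := by
  induction ps generalizing i with
  | nil => intro c hc; simp [cpfx] at hc
  | cons p ps ih =>
    intro c hc
    simp only [cpfx, List.mem_append] at hc
    rcases hc with hc | hc
    · rcases hs : PySem.Str.startswith old_name p with _ | _ <;> rw [hs] at hc <;> simp at hc
      rcases hc with ⟨h1, _⟩
      simp only [List.length_cons]
      constructor <;> omega
    · have := ih (i + 1) c hc
      simp only [List.length_cons]
      push_cast at this ⊢
      omega

theorem cpfx_pairwise (old_name : String) (ps : List String) (i : Int) :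
    (cpfx old_name i ps).Pairwise (fun a b => a.1 < b.1) := by
  induction ps generalizing i with
  | nil => exact List.Pairwise.nil
  | cons p ps ih =>
    show ((if PySem.Str.startswith old_name p then [(1 + i, pvCut old_name p)] else [])
        ++ cpfx old_name (i + 1) ps).Pairwise _
    rcases PySem.Str.startswith old_name p with _ | _
    · simpa using ih (i + 1)
    · simp only [if_true, List.singleton_append, List.pairwise_cons]
      refine ⟨fun c hc => ?_, ih (i + 1)⟩
      have := (cpfx_bounds old_name ps (i + 1) c hc).1
      omega

theorem cshr_bounds (P j : Int) (ss : List String) :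
    ∀ c ∈ cshr P j ss, 1 + P + j ≤ c.1 := by
  induction ss generalizing j with
  | nil => intro c hc; simp [cshr] at hc
  | cons s ss ih =>
    intro c hc
    rcases List.mem_cons.1 hc with hc | hc
    · subst hc; simp
    · have := ih (j + 1) c hc; omega

theorem cshr_pairwise (P j : Int) (ss : List String) :
    (cshr P j ss).Pairwise (fun a b => a.1 < b.1) := by
  induction ss generalizing j with
  | nil => exact List.Pairwise.nil
  | cons s ss ih =>
    refine List.pairwise_cons.2 ⟨fun c hc => ?_, ih (j + 1)⟩
    have := cshr_bounds P (j + 1) ss c hc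
    omega

theorem cands_pairwise (old_name : String) (pts : List String) :
    (cands old_name pts).Pairwise (fun a b => a.1 < b.1) := by
  unfold cands
  refine List.pairwise_cons.2 ⟨fun c hc => ?_, ?_⟩
  · rcases List.mem_append.1 hc with hc | hc
    · exact (cpfx_bounds old_name pts 0 c hc).1
    · rcases h : pvSharer.contains old_name with _ | _ <;> rw [h] at hc
      · simp at hc
      · have := cshr_bounds (pts.length : Int) 0 pvSharee c hc
        have : (0 : Int) ≤ (pts.length : Int) := Int.natCast_nonneg _
        omega
  · refine List.pairwise_append.2 ⟨cpfx_pairwise old_name pts 0, ?_, ?_⟩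
    · rcases h : pvSharer.contains old_name with _ | _
      · exact List.Pairwise.nil
      · exact cshr_pairwise (pts.length : Int) 0 pvSharee
    · intro a ha b hb
      have h1 := (cpfx_bounds old_name pts 0 a ha).2
      rcases h : pvSharer.contains old_name with _ | _ <;> rw [h] at hb
      · simp at hb
      · have h2 := cshr_bounds (pts.length : Int) 0 pvSharee b hb
        omega

theorem rank_mem_unique {l : List (Int × String)}
    (h : l.Pairwise (fun a b => a.1 < b.1)) {r : Int} {a b : String}
    (ha : (r, a) ∈ l) (hb : (r, b) ∈ l) : a = b := by
  induction l with
  | nil => simp at ha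
  | cons x xs ih =>
    rcases List.pairwise_cons.1 h with ⟨hx, hxs⟩
    rcases List.mem_cons.1 ha with ha | ha <;> rcases List.mem_cons.1 hb with hb | hb
    · rw [← ha] at hb; exact (Prod.mk.injEq .. ▸ hb).2.symm ▸ rfl
    · have := hx _ hb; rw [← ha] at this; simp at this
    · have := hx _ ha; rw [← hb] at this; simp at this
    · exact ih hxs ha hb

theorem find?_min {l : List (Int × String)} {p : Int × String → Bool}
    (h : l.Pairwise (fun a b => a.1 < b.1)) {a b : Int × String}
    (hf : l.find? p = some a) (hb : b ∈ l) (hpb : p b = true) : a.1 ≤ b.1 := by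
  induction l with
  | nil => simp at hf
  | cons x xs ih =>
    rcases List.pairwise_cons.1 h with ⟨hx, hxs⟩
    rw [List.find?_cons] at hf
    rcases hp : p x with _ | _ <;> rw [hp] at hf
    · rcases List.mem_cons.1 hb with hb | hb
      · rw [← hb] at hp; rw [hpb] at hp; simp at hp
      · exact ih hxs hf hb
    · simp only [Option.some.injEq] at hf
      subst hf
      rcases List.mem_cons.1 hb with hb | hb
      · rw [hb]
      · exact le_of_lt (hx b hb)

theorem find_inKeys_to_name {C : List (Int × String)} {index : List (String × String)}
    {a : Int × String}
    (hf : C.find? (fun c => pvInKeys c.2 index) = some a) :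
    C.find? (fun c => c.2 == a.2) = some a := by
  induction C with
  | nil => simp at hf
  | cons x xs ih =>
    have hpa : pvInKeys a.2 index = true := by
      have := List.find?_some hf
      simpa using this
    rw [List.find?_cons] at hf ⊢
    rcases hx : pvInKeys x.2 index with _ | _ <;> rw [hx] at hf
    · have hne : (x.2 == a.2) = false := by
        rcases h : x.2 == a.2 with _ | _
        · rfl
        · have : x.2 = a.2 := beq_iff_eq.1 h
          rw [this, hpa] at hx; simp at hx
      rw [hne]
      exact ih hf
    · simp only [Option.some.injEq] at hf
      subst hf
      simp

-- ---- A equals the first-candidate-in-keys scan ----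

theorem cpfx_find_loop (old_name : String) (index : List (String × String))
    (ps : List String) (i : Int) :
    pvPrefixLoop old_name index ps
      = ((cpfx old_name i ps).find? (fun c => pvInKeys c.2 index)).map
          (fun c => (some c.2, false)) := by
  induction ps generalizing i with
  | nil => rfl
  | cons p ps ih =>
    cases hs : PySem.Str.startswith old_name p with
    | false =>
      simp only [pvPrefixLoop, hs, Bool.false_and, Bool.false_eq_true, if_false, cpfx,
        List.nil_append]
      exact ih (i + 1)
    | true =>
      simp only [pvPrefixLoop, hs, Bool.true_and, cpfx, if_true, List.singleton_append,
        List.find?_cons]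
      cases hk : pvInKeys (pvCut old_name p) index with
      | false =>
        simp only [Bool.false_eq_true, if_false]
        exact ih (i + 1)
      | true => simp only [if_true, Option.map_some]

theorem cshr_find_loop (P : Int) (index : List (String × String)) (ss : List String)
    (j : Int) (hj : 0 ≤ j) :
    match (cshr P j ss).find? (fun c => pvInKeys c.2 index) with
    | some c => pvShareeLoop index ss = (some c.2, true) ∧ P < c.1
    | none => pvShareeLoop index ss = (none, false) := by
  induction ss generalizing j with
  | nil => exact rfl
  | cons s ss ih =>
    simp only [cshr, List.find?_cons]
    cases hk : pvInKeys s index with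
    | true =>
      exact ⟨by simp [pvShareeLoop, hk], by omega⟩
    | false =>
      have h2 := ih (j + 1) (by omega)
      simp only [pvShareeLoop, hk, Bool.false_eq_true, if_false]
      exact h2

theorem A_eq_find (old_name : String) (index : List (String × String)) (pts : List String) :
    match_checkpoint_name_py old_name index pts
      = match (cands old_name pts).find? (fun c => pvInKeys c.2 index) with
        | none => (none, false)
        | some c => (some c.2, decide ((pts.length : Int) < c.1)) := by
  unfold match_checkpoint_name_py cands
  rw [List.find?_cons]
  cases h0 : pvInKeys old_name index with
  | true =>
    simp only [if_true]
    have hP : decide ((pts.length : Int) < 0) = false :=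
      decide_eq_false (Int.not_lt.2 (Int.natCast_nonneg _))
    rw [hP]
  | false =>
    simp only [Bool.false_eq_true, if_false]
    rw [List.find?_append, cpfx_find_loop old_name index pts 0]
    cases hf : (cpfx old_name 0 pts).find? (fun c => pvInKeys c.2 index) with
    | some c =>
      simp only [Option.map_some, Option.some_or]
      have hb := (cpfx_bounds old_name pts 0 c (List.mem_of_find?_eq_some hf)).2
      have hd : decide ((pts.length : Int) < c.1) = false :=
        decide_eq_false (by omega)
      rw [hd]
    | none =>
      simp only [Option.map_none, Option.none_or]
      cases hsh : pvSharer.contains old_name with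
      | false => simp
      | true =>
        simp only [if_true]
        have hloop := cshr_find_loop (pts.length : Int) index pvSharee 0 (le_refl 0)
        cases hss : (cshr (pts.length : Int) 0 pvSharee).find?
            (fun c => pvInKeys c.2 index) with
        | some c =>
          rw [hss] at hloop
          rcases hloop with ⟨h1, h2⟩
          rw [h1]
          simp [h2]
        | none =>
          rw [hss] at hloop
          rw [hloop]

-- ---- B's loop computes the minimum-rank key ----

theorem bl_some_acc (tbl : PySem.Dict String Int)
    (l : List (String × String)) (b : Int × String) :
    pvBestLoop tbl l (some b) ≠ none := by
  induction l generalizing b with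
  | nil => simp [pvBestLoop]
  | cons kv rest ih =>
    simp only [pvBestLoop]
    cases tbl.get? kv.1 with
    | none => exact ih b
    | some r =>
      by_cases hlt : r < b.1
      · simp only [if_pos hlt]; exact ih _
      · simp only [if_neg hlt]; exact ih _

theorem bl_none (tbl : PySem.Dict String Int) (l : List (String × String)) :
    pvBestLoop tbl l none = none ↔ ∀ kv ∈ l, tbl.get? kv.1 = none := by
  induction l with
  | nil => simp [pvBestLoop]
  | cons kv rest ih =>
    simp only [pvBestLoop]
    cases hr : tbl.get? kv.1 with
    | none =>
      rw [ih]
      constructor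
      · intro h kv' hkv'
        rcases List.mem_cons.1 hkv' with h' | h'
        · rw [h', hr]
        · exact h kv' h'
      · intro h kv' hkv'
        exact h kv' (List.mem_cons_of_mem _ hkv')
    | some r =>
      constructor
      · intro h
        exact absurd h (bl_some_acc tbl rest (r, kv.1))
      · intro h
        have := h kv (List.mem_cons_self ..)
        rw [hr] at this
        simp at this

theorem bl_some (tbl : PySem.Dict String Int) (l : List (String × String)) :
    ∀ (best : Option (Int × String)) (q : Int × String),
      pvBestLoop tbl l best = some q →
      (best = some q ∨ (∃ kv ∈ l, kv.1 = q.2 ∧ tbl.get? q.2 = some q.1))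
      ∧ (∀ b, best = some b → q.1 ≤ b.1)
      ∧ (∀ kv ∈ l, ∀ r, tbl.get? kv.1 = some r → q.1 ≤ r) := by
  induction l with
  | nil =>
    intro best q h
    simp only [pvBestLoop] at h
    refine ⟨Or.inl h, ?_, ?_⟩
    · intro b hb; rw [hb] at h; cases h; exact le_refl _
    · intro kv hkv; simp at hkv
  | cons kv rest ih =>
    intro best q h
    simp only [pvBestLoop] at h
    cases hr : tbl.get? kv.1 with
    | none =>
      simp only [hr] at h
      obtain ⟨H1, H2, H3⟩ := ih best q h
      refine ⟨?_, H2, ?_⟩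
      · rcases H1 with H1 | ⟨kv', hkv', hk1, hk2⟩
        · exact Or.inl H1
        · exact Or.inr ⟨kv', List.mem_cons_of_mem _ hkv', hk1, hk2⟩
      · intro kv' hkv' r hr'
        rcases List.mem_cons.1 hkv' with h' | h'
        · rw [h', hr] at hr'; cases hr'
        · exact H3 kv' h' r hr'
    | some r =>
      simp only [hr] at h
      cases best with
      | none =>
        obtain ⟨H1, H2, H3⟩ := ih (some (r, kv.1)) q h
        have hq_le_r : q.1 ≤ r := H2 (r, kv.1) rfl
        refine ⟨?_, ?_, ?_⟩
        · rcases H1 with H1 | ⟨kv', hkv', hk1, hk2⟩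
          · have H1' : (r, kv.1) = q := Option.some.inj H1
            refine Or.inr ⟨kv, List.mem_cons_self .., ?_, ?_⟩
            · rw [← H1']
            · rw [← H1']; exact hr
          · exact Or.inr ⟨kv', List.mem_cons_of_mem _ hkv', hk1, hk2⟩
        · intro b hb; cases hb
        · intro kv' hkv' r' hr'
          rcases List.mem_cons.1 hkv' with h' | h'
          · rw [h', hr] at hr'
            have := Option.some.inj hr'
            omega
          · exact H3 kv' h' r' hr'
      | some b =>
        by_cases hlt : r < b.1
        · simp only [if_pos hlt] at h
          obtain ⟨H1, H2, H3⟩ := ih (some (r, kv.1)) q h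
          have hq_le_r : q.1 ≤ r := H2 (r, kv.1) rfl
          refine ⟨?_, ?_, ?_⟩
          · rcases H1 with H1 | ⟨kv', hkv', hk1, hk2⟩
            · have H1' : (r, kv.1) = q := Option.some.inj H1
              refine Or.inr ⟨kv, List.mem_cons_self .., ?_, ?_⟩
              · rw [← H1']
              · rw [← H1']; exact hr
            · exact Or.inr ⟨kv', List.mem_cons_of_mem _ hkv', hk1, hk2⟩
          · intro b' hb'
            have hb'' : b = b' := Option.some.inj hb'
            rw [← hb'']
            omega
          · intro kv' hkv' r' hr'
            rcases List.mem_cons.1 hkv' with h' | h'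
            · rw [h', hr] at hr'
              have := Option.some.inj hr'
              omega
            · exact H3 kv' h' r' hr'
        · simp only [if_neg hlt] at h
          obtain ⟨H1, H2, H3⟩ := ih (some b) q h
          have hq_le_b : q.1 ≤ b.1 := H2 b rfl
          refine ⟨?_, ?_, ?_⟩
          · rcases H1 with H1 | ⟨kv', hkv', hk1, hk2⟩
            · exact Or.inl H1
            · exact Or.inr ⟨kv', List.mem_cons_of_mem _ hkv', hk1, hk2⟩
          · intro b' hb'
            have hb'' : b = b' := Option.some.inj hb'
            rw [← hb'']
            exact hq_le_b
          · intro kv' hkv' r' hr'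
            rcases List.mem_cons.1 hkv' with h' | h'
            · rw [h', hr] at hr'
              have := Option.some.inj hr'
              omega
            · exact H3 kv' h' r' hr'

theorem B_eq_find (old_name : String) (index : List (String × String)) (pts : List String) :
    match_checkpoint_name_py_alt old_name index pts
      = match (cands old_name pts).find? (fun c => pvInKeys c.2 index) with
        | none => (none, false)
        | some c => (some c.2, decide ((pts.length : Int) < c.1)) := by
  unfold match_checkpoint_name_py_alt
  cases hF : (cands old_name pts).find? (fun c => pvInKeys c.2 index) with
  | none =>
    have hall : ∀ kv ∈ index, (pvRankTbl old_name pts).get? kv.1 = none := by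
      intro kv hkv
      cases hr : (pvRankTbl old_name pts).get? kv.1 with
      | none => rfl
      | some r =>
        exfalso
        have he := rankTbl_get? old_name pts kv.1
        rw [hr] at he
        cases hf2 : (cands old_name pts).find? (fun c => c.2 == kv.1) with
        | none => rw [hf2] at he; simp at he
        | some e =>
          rw [hf2] at he
          have hmem : e ∈ cands old_name pts := List.mem_of_find?_eq_some hf2
          have he2 : e.2 = kv.1 := by
            have := List.find?_some hf2
            simpa using this
          have hink : pvInKeys e.2 index = true := by
            rw [he2]; exact (inKeys_iff _ _).2 ⟨kv, hkv, rfl⟩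
          exact (List.find?_eq_none.1 hF e hmem) hink
    rw [(bl_none (pvRankTbl old_name pts) index).2 hall]
  | some a =>
    have hpa : pvInKeys a.2 index = true := by
      have := List.find?_some hF
      simpa using this
    have hfa : (cands old_name pts).find? (fun c => c.2 == a.2) = some a :=
      find_inKeys_to_name hF
    have hra : (pvRankTbl old_name pts).get? a.2 = some a.1 := by
      rw [rankTbl_get?, hfa]; rfl
    obtain ⟨kva, hkva, hkva1⟩ := (inKeys_iff a.2 index).1 hpa
    cases hq : pvBestLoop (pvRankTbl old_name pts) index none with
    | none =>
      exfalso
      have hz := (bl_none (pvRankTbl old_name pts) index).1 hq kva hkva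
      rw [hkva1, hra] at hz
      cases hz
    | some q =>
      obtain ⟨H1, H2, H3⟩ := bl_some (pvRankTbl old_name pts) index none q hq
      rcases H1 with H1 | ⟨kv', hkv', hk1, hk2⟩
      · exact absurd H1 (by simp)
      · have hqk : pvInKeys q.2 index = true := (inKeys_iff _ _).2 ⟨kv', hkv', hk1⟩
        have heq := rankTbl_get? old_name pts q.2
        rw [hk2] at heq
        cases hf2 : (cands old_name pts).find? (fun c => c.2 == q.2) with
        | none => rw [hf2] at heq; simp at heq
        | some e =>
          rw [hf2] at heq
          have he1 : e.1 = q.1 := by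
            simp only [Option.map_some, Option.some.injEq] at heq
            exact heq.symm
          have he2 : e.2 = q.2 := by
            have := List.find?_some hf2
            simpa using this
          have hemem : e ∈ cands old_name pts := List.mem_of_find?_eq_some hf2
          have hep : pvInKeys e.2 index = true := by rw [he2]; exact hqk
          have h_a_le : a.1 ≤ e.1 := find?_min (cands_pairwise old_name pts) hF hemem hep
          have h_le_a : q.1 ≤ a.1 := H3 kva hkva a.1 (by rw [hkva1]; exact hra)
          have h11 : q.1 = a.1 := by omega
          have hqmem : (a.1, q.2) ∈ cands old_name pts := by
            have he' : e = (a.1, q.2) := by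
              have : e.1 = a.1 := by omega
              exact Prod.ext_iff.2 ⟨this, he2⟩
            rw [← he']
            exact hemem
          have hamem : (a.1, a.2) ∈ cands old_name pts := by
            have : a = (a.1, a.2) := rfl
            rw [← this]
            exact List.mem_of_find?_eq_some hF
          have hnames : a.2 = q.2 :=
            rank_mem_unique (cands_pairwise old_name pts) hamem hqmem
          have hqa : q = a := Prod.ext_iff.2 ⟨h11, hnames.symm⟩
          rw [hqa]

-- ===== VERDICT (by name: the statement is the Claim_ definition above) =====
theorem match_checkpoint_name_py_spec : Claim_equal_match_checkpoint_name_py := by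
  intro old_name index prefix_to_test _
  unfold Spec_match_checkpoint_name_py
  rw [A_eq_find, B_eq_find]
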